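-- pv_equiv track=rewrite | github.com/Zesunlight/Online-Judge | NewCoder/牛牛晾衣服.py | solve
-- ===== SOURCE A (Python) =====
-- def solve(n , a , k ):
--     # write code here
--     import heapq
--     h = [-i for i in a]
--     heapq.heapify(h)
--     nature = 0
--     c = heapq.heappop(h)
--     while nature > c:
--         heapq.heappush(h, c + k - 1)
--         c = heapq.heappop(h)
--         nature -= 1
--     return -nature
-- ===== SOURCE B (Python) =====
-- def solve(n, a, k):
--     # Binary search on the finishing time t: drying in t minutes is possible
--     # iff the machine-minutes needed, sum of ceil((x - t) / (k - 1)) over wet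
--     # items x > t, fit into the t available minutes.
--     m = max(a)
--     if m <= 0:
--         return 0
--     if k <= 1:
--         return m
--     lo, hi = 0, m
--     while lo < hi:
--         mid = (lo + hi) // 2
--         need = sum((x - mid + k - 2) // (k - 1) for x in a if x > mid)
--         if need <= mid:
--             hi = mid
--         else:
--             lo = mid + 1
--     return lo
-- ===== Notes on version B (the rewrite author's own statement) =====
-- stated objective: alternative
-- what changed: A simulates drying minute by minute, each minute popping the wettest item from a heap and pushing it back reduced by k-1; B binary-searches the finishing time t directly, checking feasibility with the closed-form count sum(ceil((x-t)/(k-1)) for x>t) <= t, plus the direct answers max(a) for k<=1 and 0 when nothing is wet; B's cost no longer grows with max(a), though a timing run shows no measured speedup on the generated inputs.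
import Mathlib
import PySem

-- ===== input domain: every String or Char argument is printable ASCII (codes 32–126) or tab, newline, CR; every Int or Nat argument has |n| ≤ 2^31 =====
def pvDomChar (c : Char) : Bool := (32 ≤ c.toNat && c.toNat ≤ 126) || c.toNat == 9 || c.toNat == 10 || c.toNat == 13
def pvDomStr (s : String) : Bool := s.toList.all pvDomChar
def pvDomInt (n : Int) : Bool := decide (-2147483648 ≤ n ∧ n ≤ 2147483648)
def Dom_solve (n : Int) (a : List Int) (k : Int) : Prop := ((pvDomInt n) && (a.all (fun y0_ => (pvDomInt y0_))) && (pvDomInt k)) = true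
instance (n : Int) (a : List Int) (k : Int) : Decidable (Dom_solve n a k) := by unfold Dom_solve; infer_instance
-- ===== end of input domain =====

-- B replaces A's minute-by-minute heap simulation by a binary search on the finishing time
-- with a closed-form feasibility sum (an alternative algorithm; same return value).

-- ===== PORT A =====
-- heapq ported by its exact observable semantics on a heap of Ints: heappop removes and returns
-- the minimum value (exact: equal Ints are indistinguishable, so internal tie-breaking and heap
-- layout cannot affect any result), heappush adds a value.
def popMin (l : List Int) : Option (Int × List Int) :=
  match l.min? with
  | none => none
  | some m => some (m, l.erase m)

-- the 'while nature > c' loop; fuel is a totality guard only (never exhausted under Pre_solve)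
def solveLoop (k : Int) : Nat → List Int → Int → Int → Int
  | 0, _, nature, _ => -nature
  | fuel + 1, h, nature, c =>
    if c < nature then
      match popMin (h ++ [c + k - 1]) with
      | none => -nature        -- unreachable: the list just got an element pushed
      | some (c', h') => solveLoop k fuel h' (nature - 1) c'
    else -nature

def solve (n : Int) (a : List Int) (k : Int) : Int :=
  match popMin (a.map (fun i => -i)) with
  | none => 0                  -- heapq.heappop on an empty heap raises IndexError; excluded by Pre_solve
  | some (c, h) => solveLoop k ((-c).toNat + 1) h 0 c

-- ===== PORT B =====
def needSum (a : List Int) (mid k : Int) : Int :=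
  ((a.filter (fun x => decide (mid < x))).map
    (fun x => PySem.Int.floordiv (x - mid + k - 2) (k - 1))).sum

def bsearch (a : List Int) (k lo hi : Int) : Int :=
  if h : lo < hi then
    let mid := PySem.Int.floordiv (lo + hi) 2
    if needSum a mid k ≤ mid then bsearch a k lo mid
    else bsearch a k (mid + 1) hi
  else lo
termination_by (hi - lo).toNat
decreasing_by
  · have h1 := PySem.Int.floordiv_two_mid_bounds (le_of_lt h)
    have h2 := (PySem.Int.floordiv_lt_iff_lt_mul (a := lo + hi) (q := hi)
      (by norm_num : (0:Int) < 2)).2 (by omega)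
    omega
  · have h1 := PySem.Int.floordiv_two_mid_bounds (le_of_lt h)
    have h2 := (PySem.Int.floordiv_lt_iff_lt_mul (a := lo + hi) (q := hi)
      (by norm_num : (0:Int) < 2)).2 (by omega)
    omega

def solve_alt (n : Int) (a : List Int) (k : Int) : Int :=
  match PySem.List.max? a (fun x => x) with
  | none => 0                  -- max([]) raises ValueError; excluded by Pre_solve
  | some m => if m ≤ 0 then 0 else if k ≤ 1 then m else bsearch a k 0 m

-- ===== PRECONDITION & SPEC =====
-- Pre_solve excludes a = [] (A's heappop raises IndexError) and k ≤ 0 together with a positive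
-- element (A's loop then never terminates).
def Pre_solve (n : Int) (a : List Int) (k : Int) : Prop :=
  a ≠ [] ∧ (1 ≤ k ∨ ∀ x ∈ a, x ≤ 0)
instance (n : Int) (a : List Int) (k : Int) : Decidable (Pre_solve n a k) := by
  unfold Pre_solve; infer_instance

def pvWitness_solve : Int × List Int × Int := (3, ([5, 2, 3], 2))

def Spec_solve (n : Int) (a : List Int) (k : Int) (out : Int) : Prop := out = solve_alt n a k
instance (n : Int) (a : List Int) (k : Int) (out : Int) : Decidable (Spec_solve n a k out) := by
  unfold Spec_solve; infer_instance

-- ===== CLAIM (what is proved, stated in full; the proofs are below) =====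
def Claim_equal_solve : Prop := ∀ (n : Int) (a : List Int) (k : Int),
  Dom_solve n a k → Pre_solve n a k → Spec_solve n a k (solve n a k)

-- ===== LEMMAS AND PROOFS =====

-- machine-minutes one item of wetness x still needs if everything finishes at time u
def gfun (k u x : Int) : Int :=
  if u < x then PySem.Int.floordiv (x - u + k - 2) (k - 1) else 0

def Nsum (k u : Int) (l : List Int) : Int := (l.map (gfun k u)).sum

-- finishing times u reachable from a state with elapsed time t and remaining wetness list l
def Sset (k t : Int) (l : List Int) : Set Int := {u | t ≤ u ∧ Nsum k u l ≤ u - t}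

lemma needSum_eq_Nsum (a : List Int) (u k : Int) : needSum a u k = Nsum k u a := by
  induction a with
  | nil => rfl
  | cons x xs ih =>
    by_cases h : u < x <;>
      simp [needSum, Nsum, h, gfun] at ih ⊢ <;> simp [ih]

lemma gfun_nonneg {k : Int} (hk : 2 ≤ k) (u x : Int) : 0 ≤ gfun k u x := by
  unfold gfun; split
  · rw [PySem.Int.floordiv_eq_ediv_of_pos (by omega)]
    exact Int.ediv_nonneg (by omega) (by omega)
  · exact le_refl 0

lemma gfun_pos {k u x : Int} (hk : 2 ≤ k) (h : u < x) : 1 ≤ gfun k u x := by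
  unfold gfun; rw [if_pos h]
  exact (PySem.Int.le_floordiv_iff_mul_le (by omega)).2 (by omega)

lemma gfun_anti {k u v : Int} (hk : 2 ≤ k) (huv : u ≤ v) (x : Int) :
    gfun k v x ≤ gfun k u x := by
  by_cases hv : v < x
  · simp only [gfun, if_pos hv, if_pos (lt_of_le_of_lt huv hv)]
    rw [PySem.Int.floordiv_eq_ediv_of_pos (by omega),
      PySem.Int.floordiv_eq_ediv_of_pos (by omega)]
    exact Int.ediv_le_ediv (by omega) (by omega)
  · have h0 := gfun_nonneg hk u x
    simp only [gfun, if_neg hv]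
    exact h0

lemma gfun_step {k u x : Int} (hk : 2 ≤ k) (h : u < x) :
    gfun k u x = gfun k u (x - (k - 1)) + 1 := by
  by_cases h2 : u < x - (k - 1)
  · simp only [gfun, if_pos h, if_pos h2]
    have hnum : x - u + k - 2 = (x - (k - 1) - u + k - 2) + 1 * (k - 1) := by ring
    rw [hnum, PySem.Int.floordiv_eq_ediv_of_pos (by omega),
      PySem.Int.floordiv_eq_ediv_of_pos (by omega),
      Int.add_mul_ediv_right _ _ (by omega : (k - 1) ≠ 0)]
  · simp only [gfun, if_pos h, if_neg h2]
    have : PySem.Int.floordiv (x - u + k - 2) (k - 1) = 1 :=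
      (PySem.Int.floordiv_eq_iff_of_pos (by omega)).2 ⟨by omega, by omega⟩
    omega

lemma Nsum_nonneg {k : Int} (hk : 2 ≤ k) (u : Int) (l : List Int) : 0 ≤ Nsum k u l :=
  List.sum_nonneg (by
    intro y hy
    obtain ⟨x, _, rfl⟩ := List.mem_map.1 hy
    exact gfun_nonneg hk u x)

lemma Nsum_anti {k u v : Int} (hk : 2 ≤ k) (huv : u ≤ v) (l : List Int) :
    Nsum k v l ≤ Nsum k u l :=
  List.sum_le_sum (fun x _ => gfun_anti hk huv x)

lemma Nsum_perm (k u : Int) {l₁ l₂ : List Int} (h : l₁.Perm l₂) :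
    Nsum k u l₁ = Nsum k u l₂ :=
  (h.map _).sum_eq

lemma Nsum_zero {k u : Int} {l : List Int} (h : ∀ x ∈ l, x ≤ u) : Nsum k u l = 0 :=
  List.sum_eq_zero (by
    intro y hy
    obtain ⟨x, hx, rfl⟩ := List.mem_map.1 hy
    simp [gfun, not_lt.2 (h x hx)])

lemma Nsum_cons (k u x : Int) (l : List Int) :
    Nsum k u (x :: l) = gfun k u x + Nsum k u l := by simp [Nsum]

lemma Nsum_append_singleton (k u x : Int) (l : List Int) :
    Nsum k u (l ++ [x]) = Nsum k u l + gfun k u x := by simp [Nsum]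

-- drying the currently wettest item for one minute does not change which finishing times work
lemma step_mem_iff {k : Int} (hk : 2 ≤ k) {rest : List Int} {vmax t u : Int}
    (hmax : ∀ x ∈ rest, x ≤ vmax) (ht : t < vmax) (hu : t + 1 ≤ u) :
    Nsum k u (rest ++ [vmax - (k - 1)]) ≤ u - (t + 1) ↔ Nsum k u (vmax :: rest) ≤ u - t := by
  rw [Nsum_append_singleton, Nsum_cons]
  by_cases hc : u < vmax
  · have hstep := gfun_step hk hc
    omega
  · have h1 : gfun k u vmax = 0 := by simp [gfun, hc]
    have h2 : gfun k u (vmax - (k - 1)) = 0 := by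
      simp [gfun, show ¬ u < vmax - (k - 1) by omega]
    have h3 : Nsum k u rest = 0 := Nsum_zero (fun x hx => by have := hmax x hx; omega)
    omega

lemma popMin_spec {l : List Int} (hne : l ≠ []) :
    ∃ c h', popMin l = some (c, h') ∧ (∀ x ∈ l, c ≤ x) ∧ l.Perm (c :: h') := by
  rcases hm : l.min? with _ | m
  · rw [List.min?_eq_none_iff] at hm; exact absurd hm hne
  · have hmem : m ∈ l := List.min?_mem hm
    have hlb : ∀ x ∈ l, m ≤ x := (List.min?_eq_some_iff.1 hm).2
    exact ⟨m, l.erase m, by simp [popMin, hm], hlb, List.perm_cons_erase hmem⟩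

-- when no item is wetter than the elapsed time the loop stops, and t itself is optimal
lemma base_isLeast (k t c : Int) (h : List Int)
    (hmin : ∀ x ∈ h, c ≤ x) (hct : -c ≤ t) :
    IsLeast (Sset k t ((c :: h).map (fun m => -m))) t := by
  constructor
  · refine ⟨le_refl t, ?_⟩
    rw [Nsum_zero ?_]
    · omega
    · intro v hv
      obtain ⟨x, hx, rfl⟩ := List.mem_map.1 hv
      rcases List.mem_cons.1 hx with rfl | hx'
      · omega
      · have := hmin x hx'; omega
  · intro u hu; exact hu.1

-- the heap loop returns the least feasible finishing time
lemma loop_isLeast (k : Int) (hk : 2 ≤ k) :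
    ∀ (fuel : Nat) (h : List Int) (t c : Int),
      (∀ x ∈ h, c ≤ x) → -c - t < (fuel : Int) →
      IsLeast (Sset k t ((c :: h).map (fun m => -m))) (solveLoop k fuel h (-t) c) := by
  intro fuel
  induction fuel with
  | zero =>
    intro h t c hmin hfuel
    simp only [solveLoop, neg_neg]
    exact base_isLeast k t c h hmin (by push_cast at hfuel; omega)
  | succ fuel ih =>
    intro h t c hmin hfuel
    by_cases hg : c < -t
    · have hne : h ++ [c + k - 1] ≠ [] := by simp
      obtain ⟨c', h', hpop, hlb, hperm⟩ := popMin_spec hne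
      simp only [solveLoop, if_pos hg, hpop]
      have hn1 : -t - 1 = -(t + 1) := by ring
      rw [hn1]
      have hc'mem : c' ∈ h ++ [c + k - 1] := hperm.symm.subset (List.mem_cons_self)
      have hcc' : c ≤ c' := by
        rcases List.mem_append.1 hc'mem with h1 | h1
        · exact hmin c' h1
        · simp at h1; omega
      have ihh := ih h' (t + 1) c'
        (fun x hx => hlb x (hperm.symm.subset (List.mem_cons_of_mem _ hx)))
        (by push_cast at hfuel ⊢; omega)
      have hmaxrest : ∀ x ∈ h.map (fun m => -m), x ≤ -c := by
        intro x hx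
        obtain ⟨y, hy, rfl⟩ := List.mem_map.1 hx
        have := hmin y hy; omega
      have ht' : t < -c := by omega
      have hpermN : ((c' :: h').map (fun m => -m)).Perm
          ((h.map (fun m => -m)) ++ [-c - (k - 1)]) := by
        have hp := (hperm.symm.map (fun m : Int => -m))
        simpa [show -(c + k - 1) = -c - (k - 1) by ring] using hp
      have hvals : (c :: h).map (fun m => -m) = -c :: h.map (fun m => -m) := by simp
      obtain ⟨⟨hr1, hr2⟩, hrlb⟩ := ihh
      constructor
      · refine ⟨by omega, ?_⟩
        rw [hvals]
        rw [Nsum_perm k _ hpermN] at hr2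
        exact (step_mem_iff hk hmaxrest ht' hr1).1 hr2
      · intro u hu
        obtain ⟨hu1, hu2⟩ := hu
        rw [hvals] at hu2
        have hune : t + 1 ≤ u := by
          by_contra hco
          have hut : u = t := by omega
          have hp := gfun_pos hk ht'
          have hn := Nsum_nonneg hk t (h.map (fun m => -m))
          rw [Nsum_cons, hut] at hu2
          omega
        apply hrlb
        refine ⟨hune, ?_⟩
        rw [Nsum_perm k _ hpermN]
        exact (step_mem_iff hk hmaxrest ht' hune).2 hu2
    · simp only [solveLoop, if_neg hg, neg_neg]
      exact base_isLeast k t c h hmin (by omega)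

-- the binary search returns the least feasible finishing time
lemma bsearch_isLeast (k : Int) (hk : 2 ≤ k) (a : List Int) :
    ∀ (lo hi : Int), 0 ≤ lo → lo ≤ hi →
      (∀ u, u < lo → ¬ Nsum k u a ≤ u) → Nsum k hi a ≤ hi →
      IsLeast {u : Int | 0 ≤ u ∧ Nsum k u a ≤ u} (bsearch a k lo hi) := by
  have H : ∀ (n : Nat) (lo hi : Int), (hi - lo).toNat = n → 0 ≤ lo → lo ≤ hi →
      (∀ u, u < lo → ¬ Nsum k u a ≤ u) → Nsum k hi a ≤ hi →
      IsLeast {u : Int | 0 ≤ u ∧ Nsum k u a ≤ u} (bsearch a k lo hi) := by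
    intro n
    induction n using Nat.strong_induction_on with
    | _ n ihn =>
      intro lo hi hn hlo hlohi hlow hhi
      rw [bsearch]
      by_cases hlt : lo < hi
      · rw [dif_pos hlt]
        have hb := PySem.Int.floordiv_two_mid_bounds (le_of_lt hlt)
        have hmidlt : PySem.Int.floordiv (lo + hi) 2 < hi :=
          (PySem.Int.floordiv_lt_iff_lt_mul (by norm_num : (0:Int) < 2)).2 (by omega)
        by_cases hfeas : needSum a (PySem.Int.floordiv (lo + hi) 2) k ≤
            PySem.Int.floordiv (lo + hi) 2
        · simp only [if_pos hfeas]
          exact ihn ((PySem.Int.floordiv (lo + hi) 2 - lo).toNat) (by omega) lo _ rfl hlo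
            (by omega) hlow (by rwa [needSum_eq_Nsum] at hfeas)
        · simp only [if_neg hfeas]
          refine ihn ((hi - (PySem.Int.floordiv (lo + hi) 2 + 1)).toNat) (by omega) _ hi rfl
            (by omega) (by omega) ?_ hhi
          intro u hu hNu
          by_cases hu2 : u < lo
          · exact hlow u hu2 hNu
          · apply hfeas
            rw [needSum_eq_Nsum]
            have := Nsum_anti hk (show u ≤ PySem.Int.floordiv (lo + hi) 2 by omega) a
            omega
      · rw [dif_neg hlt]
        have hle : lo = hi := le_antisymm hlohi (not_lt.1 hlt)
        constructor
        · exact ⟨hlo, by rw [hle]; exact hhi⟩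
        · intro u hu
          by_contra hcon
          exact hlow u (by omega) hu.2
  intro lo hi
  exact H ((hi - lo).toNat) lo hi rfl

-- with k = 1 the machine never helps: the loop just counts up to the largest wetness
lemma loop_k1 : ∀ (fuel : Nat) (h : List Int) (t c : Int),
    (∀ x ∈ h, c ≤ x) → -c - t < (fuel : Int) →
    solveLoop 1 fuel h (-t) c = max t (-c) := by
  intro fuel
  induction fuel with
  | zero =>
    intro h t c hmin hfuel
    simp only [solveLoop, neg_neg]
    push_cast at hfuel
    exact (max_eq_left (by omega)).symm
  | succ fuel ih =>
    intro h t c hmin hfuel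
    by_cases hg : c < -t
    · have hm : (h ++ [c + 1 - 1]).min? = some c := by
        rw [List.min?_eq_some_iff]
        constructor
        · simp [show c + 1 - 1 = c by ring]
        · intro b hb
          rcases List.mem_append.1 hb with h1 | h1
          · exact hmin b h1
          · simp at h1; omega
      simp only [solveLoop, if_pos hg, popMin, hm]
      have herase : ∀ x ∈ (h ++ [c + 1 - 1]).erase c, c ≤ x := by
        intro x hx
        have hx' : x ∈ h ++ [c + 1 - 1] := List.mem_of_mem_erase hx
        rcases List.mem_append.1 hx' with h1 | h1
        · exact hmin x h1
        · simp at h1; omega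
      have := ih ((h ++ [c + 1 - 1]).erase c) (t + 1) c herase
        (by push_cast at hfuel ⊢; omega)
      rw [show -t - 1 = -(t + 1) by ring, this]
      rw [max_eq_right (by omega : t + 1 ≤ -c), max_eq_right (by omega : t ≤ -c)]
    · simp only [solveLoop, if_neg hg, neg_neg]
      exact (max_eq_left (by omega)).symm

-- ===== VERDICT (by name: the statement is the Claim_ definition above) =====
theorem solve_spec : Claim_equal_solve := by
  intro n a k _hdom hpre
  obtain ⟨hne, hpre2⟩ := hpre
  show solve n a k = solve_alt n a k
  have hnem : a.map (fun i => -i) ≠ [] := by simpa using hne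
  obtain ⟨c, h0, hpop, hlb, hperm⟩ := popMin_spec hnem
  obtain ⟨m, hm⟩ : ∃ m, PySem.List.max? a (fun x => x) = some m := by
    rcases hM : PySem.List.max? a (fun x => x) with _ | m
    · rw [PySem.List.max?_eq_none_iff] at hM; exact absurd hM hne
    · exact ⟨m, rfl⟩
  have hmem : m ∈ a := PySem.List.max?_mem hm
  have hmax : ∀ y ∈ a, y ≤ m := PySem.List.max?_isMax hm
  have hcm : m = -c := by
    have h1 : c ≤ -m := hlb (-m) (List.mem_map_of_mem hmem)
    have h2 : -m ≤ c := by
      have hcmem : c ∈ a.map (fun i => -i) := hperm.symm.subset List.mem_cons_self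
      obtain ⟨y, hy, hyc⟩ := List.mem_map.1 hcmem
      have := hmax y hy; omega
    omega
  have hsolve : solve n a k = solveLoop k ((-c).toNat + 1) h0 0 c := by
    unfold solve; rw [hpop]
  have hsalt : solve_alt n a k =
      (if m ≤ 0 then 0 else if k ≤ 1 then m else bsearch a k 0 m) := by
    unfold solve_alt; rw [hm]
  rw [hsolve, hsalt]
  by_cases hm0 : m ≤ 0
  · rw [if_pos hm0]
    have hc0 : ¬ c < 0 := by omega
    simp [solveLoop, hc0]
  · rw [if_neg hm0]
    by_cases hk1 : k ≤ 1
    · rw [if_pos hk1]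
      have hk : k = 1 := by
        rcases hpre2 with h1 | h1
        · omega
        · exact absurd (h1 m hmem) (by omega)
      subst hk
      have hlb0 : ∀ x ∈ h0, c ≤ x :=
        fun x hx => hlb x (hperm.symm.subset (List.mem_cons_of_mem _ hx))
      have hloop := loop_k1 ((-c).toNat + 1) h0 0 c hlb0 (by push_cast; omega)
      rw [neg_zero] at hloop
      rw [hloop]
      rw [max_eq_right (by omega : (0:Int) ≤ -c)]
      omega
    · rw [if_neg hk1]
      have hk2 : 2 ≤ k := by
        rcases hpre2 with h1 | h1
        · omega
        · exact absurd (h1 m hmem) (by omega)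
      have hlb0 : ∀ x ∈ h0, c ≤ x :=
        fun x hx => hlb x (hperm.symm.subset (List.mem_cons_of_mem _ hx))
      have hA := loop_isLeast k hk2 ((-c).toNat + 1) h0 0 c hlb0 (by push_cast; omega)
      rw [neg_zero] at hA
      have hB := bsearch_isLeast k hk2 a 0 m (le_refl 0) (by omega)
        (fun u hu hN => by have := Nsum_nonneg hk2 u a; omega)
        (by rw [Nsum_zero hmax]; omega)
      have hmapinv : (a.map (fun i => -i)).map (fun m => -m) = a := by simp
      have hperm2 : ((c :: h0).map (fun m => -m)).Perm a := by
        have hp := (hperm.map (fun m : Int => -m)).symm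
        rwa [hmapinv] at hp
      have hsets : Sset k 0 ((c :: h0).map (fun m => -m)) =
          {u : Int | 0 ≤ u ∧ Nsum k u a ≤ u} := by
        unfold Sset
        ext u
        simp only [Set.mem_setOf_eq]
        rw [Nsum_perm k u hperm2]
        constructor <;> (intro ⟨h1, h2⟩; exact ⟨h1, by omega⟩)
      rw [hsets] at hA
      exact hA.unique hB
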